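-- pv_equiv track=rewrite | github.com/153079019shariq/ATPG_Sequential | Gates.py | OR_gate
-- ===== SOURCE A (Python) =====
-- def OR_gate(list_input):
-- 	flag =0
--
-- 	for input1 in list_input:
-- 			if(input1=='1'):
-- 				return '1'
-- 			else:
-- 				if(input1=='x'):
-- 					flag =1
--
-- 	if(flag==1):
-- 		return 'x'
-- 	else:
-- 		return '0'
-- ===== SOURCE B (Python) =====
-- def OR_gate(list_input):
--     if '1' in list_input:
--         return '1'
--     if 'x' in list_input:
--         return 'x'
--     return '0'
-- ===== Notes on version B (the rewrite author's own statement) =====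
-- stated objective: idiomatic
-- what changed: Replaces the single fused loop with a flag variable by two stateless membership tests: return '1' if present, else 'x' if present, else '0'.
import Mathlib
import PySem

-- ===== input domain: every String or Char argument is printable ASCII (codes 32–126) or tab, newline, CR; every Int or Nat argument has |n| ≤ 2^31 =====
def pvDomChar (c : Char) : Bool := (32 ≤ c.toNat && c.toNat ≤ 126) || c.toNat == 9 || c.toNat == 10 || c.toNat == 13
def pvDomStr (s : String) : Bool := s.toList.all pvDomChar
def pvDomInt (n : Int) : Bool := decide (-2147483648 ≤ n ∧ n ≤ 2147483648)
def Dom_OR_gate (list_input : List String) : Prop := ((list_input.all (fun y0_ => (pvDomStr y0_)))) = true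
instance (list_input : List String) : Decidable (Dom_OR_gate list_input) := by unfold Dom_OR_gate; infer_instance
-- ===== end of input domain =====

-- ===== PORT A =====
-- Literal port of A: loop with a flag, early return on '1'.
def OR_gate_loop (list_input : List String) (flag : Nat) : String :=
  match list_input with
  | [] => if flag = 1 then "x" else "0"
  | input1 :: rest =>
    if input1 = "1" then "1"
    else if input1 = "x" then OR_gate_loop rest 1
    else OR_gate_loop rest flag

def OR_gate (list_input : List String) : String :=
  OR_gate_loop list_input 0

-- ===== PORT B =====
-- B: two stateless membership tests.
def OR_gate_alt (list_input : List String) : String :=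
  if "1" ∈ list_input then "1"
  else if "x" ∈ list_input then "x"
  else "0"

-- ===== PRECONDITION & SPEC =====
def Spec_OR_gate (list_input : List String) (out : String) : Prop := out = OR_gate_alt list_input
instance (list_input : List String) (out : String) : Decidable (Spec_OR_gate list_input out) := by unfold Spec_OR_gate; infer_instance

-- ===== CLAIM (what is proved, stated in full; the proofs are below) =====
def Claim_equal_OR_gate : Prop := ∀ (list_input : List String), Dom_OR_gate list_input → Spec_OR_gate list_input (OR_gate list_input)

-- ===== LEMMAS AND PROOFS =====

-- ===== VERDICT (by name: the statement is the Claim_ definition above) =====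
theorem OR_gate_loop_eq (l : List String) (flag : Nat) :
    OR_gate_loop l flag =
      (if "1" ∈ l then "1" else if "x" ∈ l ∨ flag = 1 then "x" else "0") := by
  induction l generalizing flag with
  | nil => simp [OR_gate_loop]
  | cons h t ih =>
    simp only [OR_gate_loop, List.mem_cons]
    by_cases h1 : h = "1"
    · simp [h1]
    · by_cases hx : h = "x"
      · simp [hx, ih]
      · have h1' : ¬("1" : String) = h := fun e => h1 e.symm
        have hx' : ¬("x" : String) = h := fun e => hx e.symm
        simp [h1, hx, h1', hx', ih]

theorem OR_gate_spec : Claim_equal_OR_gate := by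
  intro l _
  unfold Spec_OR_gate OR_gate OR_gate_alt
  rw [OR_gate_loop_eq]
  simp
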